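-- pv_equiv track=rewrite | github.com/ekeilty17/Advent-of-Code | 2016/Day_12/part_1_disassembled.py | disassembled
-- ===== SOURCE A (Python) =====
-- from typing import Dict, Tuple
--
-- def disassembled(a: int, b: int, c: int, d: int) -> Tuple[int, int, int, int]:
--     # chunk 0
--     a = 1
--     b = 1
--     d = 26
--
--     # chunk 1
--     if c != 0:
--         c = 7
--         while c != 0:
--             d += 1
--             c -= 1
--
--     # chunk 2
--     while d != 0:
--         c = a
--         while b != 0:
--             a += 1
--             b -= 1
--
--         b = c
--         d -= 1
--
--     # chunk 3
--     c = 17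
--     while c != 0:
--         d = 18
--         while d != 0:
--             a += 1
--             d -= 1
--         c -= 1
--
--     return a, b, c, d
-- ===== SOURCE B (Python) =====
-- def _fib(n):
--     # fast-doubling: returns (fib(n), fib(n+1))
--     if n == 0:
--         return (0, 1)
--     a, b = _fib(n >> 1)
--     c = a * (2 * b - a)
--     e = a * a + b * b
--     return (e, c + e) if n & 1 else (c, e)
--
-- def disassembled(a: int, b: int, c: int, d: int):
--     # the assembunny program computes Fibonacci: d iterations of (a, b) = (a+b, a)
--     # starting from (1, 1), with d = 33 if c != 0 else 26, then adds 17*18 to a.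
--     n = 33 if c != 0 else 26
--     f1, f2 = _fib(n + 1)          # (fib(n+1), fib(n+2))
--     return (f2 + 17 * 18, f1, 0, 0)
-- ===== Notes on version B (the rewrite author's own statement) =====
-- stated objective: faster
-- what changed: B replaces the unary-counting assembunny interpretation (millions of +1 loop iterations) with a fast-doubling Fibonacci computation: the output depends only on whether c != 0, giving Fib(n+2)+306 and Fib(n+1) for n = 33 or 26.
import Mathlib
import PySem

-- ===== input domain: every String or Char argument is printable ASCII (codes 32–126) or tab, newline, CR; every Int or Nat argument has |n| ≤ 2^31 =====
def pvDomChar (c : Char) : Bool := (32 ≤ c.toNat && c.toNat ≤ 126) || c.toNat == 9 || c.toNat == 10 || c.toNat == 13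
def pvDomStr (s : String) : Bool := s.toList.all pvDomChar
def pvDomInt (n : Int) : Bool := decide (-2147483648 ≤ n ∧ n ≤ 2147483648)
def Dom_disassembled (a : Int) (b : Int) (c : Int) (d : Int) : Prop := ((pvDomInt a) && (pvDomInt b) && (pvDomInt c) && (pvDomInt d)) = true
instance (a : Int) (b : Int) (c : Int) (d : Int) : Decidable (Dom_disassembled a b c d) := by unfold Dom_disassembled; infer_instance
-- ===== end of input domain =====

-- B replaces A's unary-counting loop interpretation by a fast-doubling Fibonacci
-- computation (the result depends only on whether c ≠ 0); objective: faster.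

-- ===== PORT A =====
-- Each Python `while x != 0: x -= 1; …` loop is ported with an explicit Nat fuel
-- equal to x.toNat at entry; since every loop counter starts at a nonnegative value
-- and decreases by exactly 1 per iteration, the fuel is exactly the iteration count
-- and the port is exact.

-- chunk 1 loop: while c != 0: d += 1; c -= 1
def loop1 : Nat → Int → Int → Int × Int
  | 0, cc, dd => (cc, dd)
  | f+1, cc, dd => if cc ≠ 0 then loop1 f (cc - 1) (dd + 1) else (cc, dd)

-- chunk 2 inner loop: while b != 0: a += 1; b -= 1
def innerLoop : Nat → Int → Int → Int × Int
  | 0, aa, bb => (aa, bb)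
  | f+1, aa, bb => if bb ≠ 0 then innerLoop f (aa + 1) (bb - 1) else (aa, bb)

-- chunk 2 outer loop: while d != 0: c = a; <inner>; b = c; d -= 1   (state a b c d)
def chunk2 : Nat → Int → Int → Int → Int → Int × Int × Int × Int
  | 0, aa, bb, cc, dd => (aa, bb, cc, dd)
  | f+1, aa, bb, cc, dd =>
    if dd ≠ 0 then
      let cc' := aa
      let p := innerLoop bb.toNat aa bb
      chunk2 f p.1 cc' cc' (dd - 1)
    else (aa, bb, cc, dd)

-- chunk 3 inner loop: while d != 0: a += 1; d -= 1
def chunk3inner : Nat → Int → Int → Int × Int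
  | 0, aa, dd => (aa, dd)
  | f+1, aa, dd => if dd ≠ 0 then chunk3inner f (aa + 1) (dd - 1) else (aa, dd)

-- chunk 3 outer loop: while c != 0: d = 18; <inner>; c -= 1   (returns a, c, d)
def chunk3outer : Nat → Int → Int → Int → Int × Int × Int
  | 0, cc, aa, dd => (aa, cc, dd)
  | f+1, cc, aa, dd =>
    if cc ≠ 0 then
      let p := chunk3inner (Int.toNat 18) aa 18
      chunk3outer f (cc - 1) p.1 p.2
    else (aa, cc, dd)

def disassembled (a : Int) (b : Int) (c : Int) (d : Int) : Int × Int × Int × Int :=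
  -- chunk 0: a = 1; b = 1; d = 26 (folded into the calls below)
  -- chunk 1
  let cd1 := if c ≠ 0 then loop1 (Int.toNat 7) 7 26 else (c, 26)
  -- chunk 2 (a = 1, b = 1)
  let r2 := chunk2 cd1.2.toNat 1 1 cd1.1 cd1.2
  -- chunk 3 (c = 17)
  let r3 := chunk3outer (Int.toNat 17) 17 r2.1 r2.2.2.2
  (r3.1, r2.2.1, r3.2.1, r3.2.2)

-- ===== PORT B =====
-- fast-doubling Fibonacci, returns (fib n, fib (n+1)); the recursion on n >> 1 is
-- carried by an explicit fuel ≥ recursion depth (fuel = n suffices), exact.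
def fibFD : Nat → Nat → Int × Int
  | 0, _ => (0, 1)
  | f+1, n =>
    if n = 0 then (0, 1)
    else
      let p := fibFD f (n / 2)
      let x := p.1 * (2 * p.2 - p.1)
      let y := p.1 * p.1 + p.2 * p.2
      if n % 2 = 1 then (y, x + y) else (x, y)

def disassembled_alt (a : Int) (b : Int) (c : Int) (d : Int) : Int × Int × Int × Int :=
  let n : Nat := if c ≠ 0 then 33 else 26
  let f := fibFD (n + 1) (n + 1)
  (f.2 + 17 * 18, f.1, 0, 0)

-- ===== PRECONDITION & SPEC =====
def Spec_disassembled (a : Int) (b : Int) (c : Int) (d : Int) (out : Int × Int × Int × Int) : Prop := out = disassembled_alt a b c d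
instance (a : Int) (b : Int) (c : Int) (d : Int) (out : Int × Int × Int × Int) : Decidable (Spec_disassembled a b c d out) := by unfold Spec_disassembled; infer_instance

-- ===== CLAIM (what is proved, stated in full; the proofs are below) =====
def Claim_equal_disassembled : Prop := ∀ (a : Int) (b : Int) (c : Int) (d : Int), Dom_disassembled a b c d → Spec_disassembled a b c d (disassembled a b c d)

-- ===== LEMMAS AND PROOFS =====

-- the pure Fibonacci step iterated: g n (a, b) = n iterations of (a, b) ↦ (a+b, a)
def g : Nat → Int → Int → Int × Int
  | 0, aa, bb => (aa, bb)
  | n+1, aa, bb => g n (aa + bb) aa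

theorem innerLoop_eq (n : Nat) : ∀ (aa : Int), innerLoop n aa (n : Int) = (aa + n, 0) := by
  induction n with
  | zero => intro aa; simp [innerLoop]
  | succ m ih =>
    intro aa
    have h : ((m : Int) + 1) ≠ 0 := by positivity
    show innerLoop (m+1) aa ((m : Int) + 1) = _
    rw [innerLoop, if_pos (by exact_mod_cast h)]
    rw [show ((m : Int) + 1 - 1) = (m : Int) by ring, ih (aa + 1)]
    simp only [Prod.mk.injEq, and_true]
    push_cast; ring

theorem chunk2_eq (f : Nat) : ∀ (aa bb cc : Int), 0 ≤ aa → 0 ≤ bb →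
    chunk2 f aa bb cc (f : Int) =
      ((g f aa bb).1, (g f aa bb).2, if f = 0 then cc else (g f aa bb).2, 0) := by
  induction f with
  | zero => intro aa bb cc _ _; simp [chunk2, g]
  | succ m ih =>
    intro aa bb cc ha hb
    have hd : ((m : Int) + 1) ≠ 0 := by positivity
    show chunk2 (m+1) aa bb cc ((m : Int) + 1) = _
    rw [chunk2]
    rw [if_pos (by exact_mod_cast hd)]
    have hin : innerLoop bb.toNat aa bb = (aa + bb, 0) := by
      have := innerLoop_eq bb.toNat aa
      rwa [Int.toNat_of_nonneg hb] at this
    simp only [hin, show ((m : Int) + 1 - 1) = (m : Int) by ring]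
    have := ih (aa + bb) aa aa (by omega) ha
    rw [this]
    have hg : g (m+1) aa bb = g m (aa + bb) aa := rfl
    rw [hg]
    rcases Nat.eq_zero_or_pos m with h0 | hpos
    · subst h0; simp [g]
    · simp [Nat.pos_iff_ne_zero.mp hpos]

theorem chunk2_26 : chunk2 26 1 1 0 26 = (317811, 196418, 196418, 0) := by
  have := chunk2_eq 26 1 1 0 (by norm_num) (by norm_num)
  norm_num at this
  rw [this]
  decide

theorem chunk2_33 : chunk2 33 1 1 0 33 = (9227465, 5702887, 5702887, 0) := by
  have := chunk2_eq 33 1 1 0 (by norm_num) (by norm_num)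
  norm_num at this
  rw [this]
  decide

set_option maxRecDepth 10000 in
theorem A_zero (a b d : Int) : disassembled a b 0 d = (318117, 196418, 0, 0) := by
  simp only [disassembled]
  norm_num
  rw [show Int.toNat 26 = 26 from rfl, chunk2_26]
  decide

set_option maxRecDepth 10000 in
theorem A_ne (a b c d : Int) (hc : c ≠ 0) : disassembled a b c d = (9227771, 5702887, 0, 0) := by
  simp only [disassembled]
  rw [if_pos hc]
  rw [show loop1 (Int.toNat 7) 7 26 = (0, 33) from rfl]
  norm_num
  rw [show Int.toNat 33 = 33 from rfl, chunk2_33]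
  decide

set_option maxRecDepth 10000 in
theorem B_zero (a b d : Int) : disassembled_alt a b 0 d = (318117, 196418, 0, 0) := by
  simp only [disassembled_alt]
  norm_num
  decide

set_option maxRecDepth 10000 in
theorem B_ne (a b c d : Int) (hc : c ≠ 0) : disassembled_alt a b c d = (9227771, 5702887, 0, 0) := by
  simp only [disassembled_alt]
  rw [if_pos hc]
  decide

-- ===== VERDICT (by name: the statement is the Claim_ definition above) =====
theorem disassembled_spec : Claim_equal_disassembled := by
  intro a b c d _
  unfold Spec_disassembled
  by_cases hc : c = 0
  · subst hc; rw [A_zero, B_zero]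
  · rw [A_ne a b c d hc, B_ne a b c d hc]
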